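-- pv_equiv track=rewrite | github.com/F1gueron/Design-and-Analysis-of-Algorithms | Backtrakcing/SumaSubconjuntos.py | sumaVA
-- ===== SOURCE A (Python) =====
-- def esSolucion(conj, k, sol):
--     if k < len(sol):
--         return False
--     else:
--         suma = 0
--         for i in range(len(sol)):
--             suma += sol[i] * conj[i]
--     return suma == 0
--
-- def esFactible(k, sol):
--     return k < len(sol)
--
-- def sumaVA(conj, k, sol):
--     if esSolucion(conj, k, sol): #tengo una soluci贸n
--         esSol = True
--     else:
--         conjuntosPosibles = [-1, 1]
--         esSol = False
--         if esFactible(k, sol):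
--             i = 0
--             while i < len(conjuntosPosibles) and not esSol:
--                 sol[k] = conjuntosPosibles[i]
--                 esSol, sol = sumaVA(conj, k + 1, sol)
--                 if not esSol:
--                     sol[k] = 0
--                 i += 1
--
--     return esSol,sol
-- ===== SOURCE B (Python) =====
-- def sumaVA(conj, k, sol):
--     # Subset-sum DP over the sets of reachable suffix sums, then greedy
--     # lexicographic (-1-first) reconstruction. Mutates sol in place like the original.
--     n = len(sol)
--     if k >= n:
--         return (sum(sol[i] * conj[i] for i in range(n)) == 0, sol)
--     base = sum(sol[i] * conj[i] for i in range(k))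
--     # sets built from the shortest suffix up: after the loop and the reverse,
--     # sets[m] is the set of sums achievable by signing conj[k+m:n]
--     sets = [{0}]
--     acc = {0}
--     for c in reversed(conj[k:n]):
--         nxt = set()
--         for s in acc:
--             nxt.add(s + c)
--             nxt.add(s - c)
--         sets.append(nxt)
--         acc = nxt
--     sets.reverse()
--     t = -base
--     if t not in sets[0]:
--         for j in range(k, n):
--             sol[j] = 0
--         return (False, sol)
--     for j in range(k, n):
--         c = conj[j]
--         if (t + c) in sets[j - k + 1]:
--             sol[j] = -1
--             t = t + c
--         else:
--             sol[j] = 1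
--             t = t - c
--     return (True, sol)
-- ===== Notes on version B (the rewrite author's own statement) =====
-- stated objective: alternative
-- what changed: Replaces the exponential backtracking search (try -1/1 at each position, recurse, undo) by a subset-sum DP that computes the sets of reachable suffix sums once and then reconstructs the -1-before-1 lexicographically first signing greedily; much faster when the reachable sums stay bounded, but not confirmed faster on arbitrary 2^31-sized inputs.
-- outside the precondition, e.g. on sumaVA([1, -1], -1, [0, 0]): A returns (True, [-1, -1]), B returns (False, [0, 0])
import Mathlib
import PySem

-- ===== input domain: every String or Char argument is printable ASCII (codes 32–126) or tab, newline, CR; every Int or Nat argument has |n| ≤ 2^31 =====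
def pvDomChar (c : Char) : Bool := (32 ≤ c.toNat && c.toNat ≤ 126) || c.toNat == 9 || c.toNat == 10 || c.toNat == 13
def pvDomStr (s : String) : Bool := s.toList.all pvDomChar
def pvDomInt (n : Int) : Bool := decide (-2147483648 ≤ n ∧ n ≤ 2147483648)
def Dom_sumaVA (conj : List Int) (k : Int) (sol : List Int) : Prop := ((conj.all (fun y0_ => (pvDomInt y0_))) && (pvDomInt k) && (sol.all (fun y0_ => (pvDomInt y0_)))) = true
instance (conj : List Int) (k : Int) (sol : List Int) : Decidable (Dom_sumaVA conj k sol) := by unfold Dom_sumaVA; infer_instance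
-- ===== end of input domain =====

-- B replaces A's exponential ±1 backtracking by a suffix-sum reachability DP plus greedy
-- reconstruction (objective: alternative algorithm; no speed claim). Both Pythons mutate `sol`
-- in place the same way on the admitted inputs; the theorems are about the returned pair.

-- ===== PORT A =====
-- 'suma = 0; for i in range(m): suma += sol[i]*conj[i]' — the sum loop both sources contain
def pvDotRange (conj : List Int) (sol : List Int) (m : Nat) : Int :=
  (List.range m).foldl (fun suma (i : Nat) => suma + PySem.List.pyGetD sol (i : Int) 0 * PySem.List.pyGetD conj (i : Int) 0) 0

def esSolucion (conj : List Int) (k : Int) (sol : List Int) : Bool :=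
  if k < (sol.length : Int) then false
  else decide (pvDotRange conj sol sol.length = 0)

def esFactible (k : Int) (sol : List Int) : Bool := decide (k < (sol.length : Int))

-- sol[k] = v with Python's negative-index wraparound (exact for -len(sol) ≤ k; Python's
-- IndexError for k < -len(sol) lies outside Pre_)
def pySetAt (xs : List Int) (k : Int) (v : Int) : List Int :=
  xs.set (if k < 0 then k + (xs.length : Int) else k).toNat v

-- the recursion, made total with fuel (the fuel branch is unreachable for the initial fuel
-- sumaVA passes, since the recursion depth is at most len(sol) - k); the 2-iteration
-- 'while i < len(conjuntosPosibles) and not esSol' loop over [-1, 1] is written out as its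
-- two iterations with the early exit
def sumaVAgo (conj : List Int) (fuel : Nat) (k : Int) (sol : List Int) : Bool × List Int :=
  match fuel with
  | 0 => (false, sol)
  | fuel + 1 =>
    if esSolucion conj k sol then (true, sol)
    else if esFactible k sol then
      let sol₁ := pySetAt sol k (-1)
      let r₁ := sumaVAgo conj fuel (k + 1) sol₁
      if r₁.1 then (true, r₁.2)
      else
        let sol₂ := pySetAt (pySetAt r₁.2 k 0) k 1
        let r₂ := sumaVAgo conj fuel (k + 1) sol₂
        if r₂.1 then (true, r₂.2)
        else (false, pySetAt r₂.2 k 0)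
    else (false, sol)

def sumaVA (conj : List Int) (k : Int) (sol : List Int) : Bool × List Int :=
  sumaVAgo conj ((sol.length + (-k).toNat) + 1) k sol

-- ===== PORT B =====
def sumaVA_alt (conj : List Int) (k : Int) (sol : List Int) : Bool × List Int :=
  let n := sol.length
  if (n : Int) ≤ k then
    (decide (pvDotRange conj sol n = 0), sol)
  else
    -- base = sum(sol[i]*conj[i] for i in range(k))  (range(k) is empty for k < 0: toNat exact)
    let base := pvDotRange conj sol k.toNat
    let s0 : PySem.Set Int := PySem.Set.ofList [0]
    -- for c in reversed(conj[k:n]): nxt = {s+c, s-c for s in acc}; sets.append(nxt)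
    let p := ((PySem.List.slice conj (some k) (some (n : Int))).reverse).foldl
      (fun (p : PySem.Set Int × List (PySem.Set Int)) c =>
        let nxt := p.1.foldl (fun nx s => PySem.Set.add (PySem.Set.add nx (s + c)) (s - c)) PySem.Set.empty
        (nxt, p.2 ++ [nxt])) (s0, [s0])
    let sets := p.2.reverse
    let t := -base
    if !((sets.getD 0 PySem.Set.empty).contains t) then
      (false, (PySem.List.pyRange k (n : Int)).foldl (fun s j => s.set j.toNat 0) sol)
    else
      let q := (PySem.List.pyRange k (n : Int)).foldl
        (fun (q : Int × List Int) j =>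
          let c := PySem.List.pyGetD conj j 0
          if (sets.getD (j - k + 1).toNat PySem.Set.empty).contains (q.1 + c) then
            (q.1 + c, q.2.set j.toNat (-1))
          else
            (q.1 - c, q.2.set j.toNat 1)) (t, sol)
      (true, q.2)

-- ===== PRECONDITION & SPEC =====
-- Pre_ excludes (a) inputs with len(sol) > len(conj), on which A raises IndexError, and
-- (b) negative k, outside the natural domain of a start index: there A wraps sol[k] around
-- (raising IndexError when k < -len(sol)); B does not reproduce that wraparound.
def Pre_sumaVA (conj : List Int) (k : Int) (sol : List Int) : Prop :=
  0 ≤ k ∧ sol.length ≤ conj.length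
instance (conj : List Int) (k : Int) (sol : List Int) : Decidable (Pre_sumaVA conj k sol) := by
  unfold Pre_sumaVA; infer_instance

def pvWitness_sumaVA : List Int × Int × List Int := ([1, 2, 3], 0, [0, 0, 0])

def Spec_sumaVA (conj : List Int) (k : Int) (sol : List Int) (out : Bool × List Int) : Prop := out = sumaVA_alt conj k sol
instance (conj : List Int) (k : Int) (sol : List Int) (out : Bool × List Int) : Decidable (Spec_sumaVA conj k sol out) := by unfold Spec_sumaVA; infer_instance

-- ===== CLAIM (what is proved, stated in full; the proofs are below) =====
def Claim_equal_sumaVA : Prop := ∀ (conj : List Int) (k : Int) (sol : List Int), Dom_sumaVA conj k sol → Pre_sumaVA conj k sol → Spec_sumaVA conj k sol (sumaVA conj k sol)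

-- ===== LEMMAS AND PROOFS =====

-- 'can the suffix cs be signed with ±1 so that the signed sum equals t'
def canReachL : List Int → Int → Bool
  | [], t => decide (t = 0)
  | c :: cs, t => canReachL cs (t - c) || canReachL cs (t + c)

-- the lexicographically first (-1 before 1) such signing
def greedyL : List Int → Int → List Int
  | [], _ => []
  | c :: cs, t => if canReachL cs (t + c) then (-1) :: greedyL cs (t + c) else 1 :: greedyL cs (t - c)

def pvDot (conj sol : List Int) (j : Nat) : Int :=
  ((List.range j).map (fun i => sol.getD i 0 * conj.getD i 0)).sum

def pvSuffix (conj : List Int) (n j : Nat) : List Int := (conj.drop j).take (n - j)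

-- the common canonical form both ports are proved equal to
def canon (conj sol : List Int) (j : Nat) : Bool × List Int :=
  let t := -(pvDot conj sol j)
  let L := pvSuffix conj sol.length j
  if canReachL L t then (true, sol.take j ++ greedyL L t)
  else (false, sol.take j ++ List.replicate (sol.length - j) 0)

lemma pvDotRange_eq (conj sol : List Int) (m : Nat) : pvDotRange conj sol m = pvDot conj sol m := by
  unfold pvDotRange pvDot
  rw [PySem.List.foldl_add (l := List.range m)
      (g := fun (i : Nat) => PySem.List.pyGetD sol (i : Int) 0 * PySem.List.pyGetD conj (i : Int) 0), zero_add]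
  congr 1
  apply List.map_congr_left
  intro i _
  rw [PySem.List.pyGetD_natCast, PySem.List.pyGetD_natCast]

lemma pvSuffix_cons (conj : List Int) (n j : Nat) (hj : j < n) (hc : n ≤ conj.length) :
    pvSuffix conj n j = conj.getD j 0 :: pvSuffix conj n (j + 1) := by
  unfold pvSuffix
  rw [List.drop_eq_getElem_cons (by omega), List.getD_eq_getElem?_getD,
      List.getElem?_eq_getElem (by omega)]
  have h : n - j = (n - (j + 1)) + 1 := by omega
  rw [h, List.take_succ_cons]
  simp

lemma pvSuffix_length (conj : List Int) (n j : Nat) (_hj : j ≤ n) (hc : n ≤ conj.length) :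
    (pvSuffix conj n j).length = n - j := by
  unfold pvSuffix
  simp [List.length_take, List.length_drop]
  omega

lemma pvSuffix_drop (conj : List Int) (n j m : Nat) :
    (pvSuffix conj n j).drop m = pvSuffix conj n (j + m) := by
  unfold pvSuffix
  rw [List.drop_take, List.drop_drop]
  congr 1
  omega

lemma take_set_succ (sol : List Int) (j : Nat) (v : Int) (hj : j < sol.length) :
    (sol.set j v).take (j + 1) = sol.take j ++ [v] := by
  rw [List.set_eq_take_append_cons_drop, if_pos hj, List.take_append, List.take_take]
  simp [List.length_take, Nat.min_eq_left hj.le]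

lemma take_set_prefix (sol : List Int) (j : Nat) (v : Int) : (sol.set j v).take j = sol.take j := by
  rw [List.take_set]
  exact List.set_eq_of_length_le (by simp [List.length_take])

lemma set_canon (xs : List Int) (v w : Int) (rest : List Int) (j : Nat) (hx : xs.length = j) :
    (xs ++ v :: rest).set j w = xs ++ w :: rest := by
  rw [List.set_append]
  simp [hx]

lemma take_canon (xs : List Int) (v : Int) (rest : List Int) (j : Nat) (hx : xs.length = j) :
    (xs ++ v :: rest).take (j + 1) = xs ++ [v] := by
  rw [List.take_append]
  simp [hx, List.take_of_length_le (by omega : xs.length ≤ j + 1)]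

lemma getD_canon (xs : List Int) (v : Int) (rest : List Int) (j : Nat) (hx : xs.length = j) :
    (xs ++ v :: rest).getD j 0 = v := by
  subst hx
  rw [List.getD_eq_getElem?_getD, List.getElem?_append_right (le_refl _)]
  simp

lemma getD_set_self' (sol : List Int) (j : Nat) (v : Int) (h : j < sol.length) :
    (sol.set j v).getD j 0 = v := by
  rw [List.getD_eq_getElem?_getD, List.getElem?_set_self h]
  rfl

lemma pvDot_succ (conj a : List Int) (j : Nat) :
    pvDot conj a (j + 1) = pvDot conj a j + a.getD j 0 * conj.getD j 0 := by
  unfold pvDot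
  rw [List.range_succ]
  simp

lemma pvDot_eq_of_take_eq (conj a b : List Int) (m : Nat) (h : a.take m = b.take m) :
    pvDot conj a m = pvDot conj b m := by
  unfold pvDot
  congr 1
  apply List.map_congr_left
  intro i hi
  rw [List.mem_range] at hi
  have hab : a.getD i 0 = b.getD i 0 := by
    rw [List.getD_eq_getElem?_getD, List.getD_eq_getElem?_getD,
        ← List.getElem?_take_of_lt (l := a) hi, ← List.getElem?_take_of_lt (l := b) hi, h]
  rw [hab]

lemma pvDot_set_succ (conj sol : List Int) (j : Nat) (e : Int) (hj : j < sol.length) :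
    pvDot conj (sol.set j e) (j + 1) = pvDot conj sol j + e * conj.getD j 0 := by
  rw [pvDot_succ, pvDot_eq_of_take_eq conj _ sol j (take_set_prefix sol j e),
      getD_set_self' sol j e hj]

lemma pvDot_canon_succ (conj xs : List Int) (v : Int) (rest : List Int) (j : Nat)
    (hx : xs.length = j) (b : List Int) (hb : b.take j = xs) :
    pvDot conj (xs ++ v :: rest) (j + 1) = pvDot conj b j + v * conj.getD j 0 := by
  rw [pvDot_succ, getD_canon xs v rest j hx]
  congr 1
  apply pvDot_eq_of_take_eq
  rw [List.take_append, hx]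
  simp [List.take_of_length_le (by omega : xs.length ≤ j), hb]

-- ===== A-side characterisation =====
lemma pySetAt_natCast (xs : List Int) (j : Nat) (v : Int) :
    pySetAt xs (j : Int) v = xs.set j v := by
  unfold pySetAt
  rw [if_neg (by exact_mod_cast Nat.not_lt_zero j)]
  simp

lemma canon_len (conj sol : List Int) (j : Nat) (n : Nat) (hn : sol.length = n)
    (_hj : j ≤ n) (_hc : n ≤ conj.length) :
    canon conj sol j =
      if canReachL (pvSuffix conj n j) (-(pvDot conj sol j)) then
        (true, sol.take j ++ greedyL (pvSuffix conj n j) (-(pvDot conj sol j)))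
      else (false, sol.take j ++ List.replicate (n - j) 0) := by
  unfold canon
  rw [hn]

lemma A_char (conj : List Int) : ∀ (fuel j : Nat) (sol : List Int),
    j ≤ sol.length → sol.length ≤ conj.length → sol.length - j < fuel →
    sumaVAgo conj fuel (j : Int) sol = canon conj sol j := by
  intro fuel
  induction fuel with
  | zero => intro j sol _ _ h3; omega
  | succ f ih =>
    intro j sol hjn hc hfuel
    by_cases hlt : j < sol.length
    · -- j < len(sol): the two recursive branches
      have hesS : esSolucion conj (j : Int) sol = false := by
        unfold esSolucion
        rw [if_pos (by exact_mod_cast hlt)]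
      have hesF : esFactible (j : Int) sol = true := by
        unfold esFactible
        simp only [decide_eq_true_eq]
        exact_mod_cast hlt
      have hcast : (j : Int) + 1 = ((j + 1 : Nat) : Int) := by push_cast; ring
      have htakelen : (sol.take j).length = j := by
        simp [List.length_take, Nat.min_eq_left hlt.le]
      -- first recursive call, on sol with sol[j] = -1
      have hlen1 : (sol.set j (-1)).length = sol.length := by simp
      have r1 : sumaVAgo conj f ((j + 1 : Nat) : Int) (sol.set j (-1)) =
          canon conj (sol.set j (-1)) (j + 1) := by
        apply ih <;> simp <;> omega
      have hdot1 : -(pvDot conj (sol.set j (-1)) (j + 1)) =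
          -(pvDot conj sol j) + conj.getD j 0 := by
        rw [pvDot_set_succ conj sol j (-1) hlt]; ring
      have hcanon1 : canon conj (sol.set j (-1)) (j + 1) =
          if canReachL (pvSuffix conj sol.length (j + 1)) (-(pvDot conj sol j) + conj.getD j 0) then
            (true, sol.take j ++ (-1) :: greedyL (pvSuffix conj sol.length (j + 1)) (-(pvDot conj sol j) + conj.getD j 0))
          else (false, sol.take j ++ (-1) :: List.replicate (sol.length - (j + 1)) 0) := by
        rw [canon_len conj _ (j + 1) sol.length hlen1 (by omega) hc, hdot1,
            take_set_succ sol j (-1) hlt]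
        simp [List.append_assoc]
      -- unfold one step of A
      rw [sumaVAgo, hesS, hesF]
      simp only [pySetAt_natCast, Bool.false_eq_true, if_false, if_true, hcast, r1, hcanon1]
      by_cases hb1 : canReachL (pvSuffix conj sol.length (j + 1)) (-(pvDot conj sol j) + conj.getD j 0) = true
      · -- sol[j] = -1 succeeds
        rw [if_pos hb1, canon_len conj sol j sol.length rfl hjn hc,
            pvSuffix_cons conj sol.length j hlt hc]
        have hcan : canReachL (conj.getD j 0 :: pvSuffix conj sol.length (j + 1)) (-pvDot conj sol j) = true := by
          simp only [canReachL, Bool.or_eq_true]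
          right
          exact hb1
        have hg : greedyL (conj.getD j 0 :: pvSuffix conj sol.length (j + 1)) (-pvDot conj sol j) =
            -1 :: greedyL (pvSuffix conj sol.length (j + 1)) (-pvDot conj sol j + conj.getD j 0) := by
          simp only [greedyL]
          rw [if_pos hb1]
        rw [if_pos hcan, hg]
        simp
      · -- sol[j] = -1 fails: reset, try sol[j] = 1
        rw [if_neg hb1]
        simp only [Bool.false_eq_true, if_false]
        have hset0 : (sol.take j ++ (-1) :: List.replicate (sol.length - (j + 1)) 0).set j 0 =
            sol.take j ++ 0 :: List.replicate (sol.length - (j + 1)) 0 :=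
          set_canon _ _ _ _ _ htakelen
        have hset1 : (sol.take j ++ (0 : Int) :: List.replicate (sol.length - (j + 1)) 0).set j 1 =
            sol.take j ++ 1 :: List.replicate (sol.length - (j + 1)) 0 :=
          set_canon _ _ _ _ _ htakelen
        rw [hset0, hset1]
        have hlen2 : (sol.take j ++ (1 : Int) :: List.replicate (sol.length - (j + 1)) 0).length = sol.length := by
          simp [htakelen]
          omega
        have r2 : sumaVAgo conj f ((j + 1 : Nat) : Int)
            (sol.take j ++ 1 :: List.replicate (sol.length - (j + 1)) 0) =
            canon conj (sol.take j ++ 1 :: List.replicate (sol.length - (j + 1)) 0) (j + 1) := by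
          apply ih <;> omega
        have hdot2 : -(pvDot conj (sol.take j ++ 1 :: List.replicate (sol.length - (j + 1)) 0) (j + 1)) =
            -(pvDot conj sol j) - conj.getD j 0 := by
          rw [pvDot_canon_succ conj (sol.take j) 1 _ j htakelen sol rfl]
          ring
        have hcanon2 : canon conj (sol.take j ++ 1 :: List.replicate (sol.length - (j + 1)) 0) (j + 1) =
            if canReachL (pvSuffix conj sol.length (j + 1)) (-(pvDot conj sol j) - conj.getD j 0) then
              (true, sol.take j ++ 1 :: greedyL (pvSuffix conj sol.length (j + 1)) (-(pvDot conj sol j) - conj.getD j 0))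
            else (false, sol.take j ++ 1 :: List.replicate (sol.length - (j + 1)) 0) := by
          rw [canon_len conj _ (j + 1) sol.length hlen2 (by omega) hc, hdot2,
              take_canon (sol.take j) 1 _ j htakelen]
          simp [List.append_assoc]
        rw [r2, hcanon2]
        by_cases hb2 : canReachL (pvSuffix conj sol.length (j + 1)) (-(pvDot conj sol j) - conj.getD j 0) = true
        · -- sol[j] = 1 succeeds
          rw [if_pos hb2, canon_len conj sol j sol.length rfl hjn hc,
              pvSuffix_cons conj sol.length j hlt hc]
          have hcan : canReachL (conj.getD j 0 :: pvSuffix conj sol.length (j + 1)) (-pvDot conj sol j) = true := by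
            simp only [canReachL, Bool.or_eq_true]
            left
            exact hb2
          have hg : greedyL (conj.getD j 0 :: pvSuffix conj sol.length (j + 1)) (-pvDot conj sol j) =
              1 :: greedyL (pvSuffix conj sol.length (j + 1)) (-pvDot conj sol j - conj.getD j 0) := by
            simp only [greedyL]
            rw [if_neg hb1]
          rw [if_pos hcan, hg]
          simp
        · -- both fail
          rw [if_neg hb2]
          simp only [Bool.false_eq_true, if_false]
          have hsetz : (sol.take j ++ (1 : Int) :: List.replicate (sol.length - (j + 1)) 0).set j 0 =
              sol.take j ++ 0 :: List.replicate (sol.length - (j + 1)) 0 :=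
            set_canon _ _ _ _ _ htakelen
          have hrep : List.replicate (sol.length - j) (0 : Int) =
              0 :: List.replicate (sol.length - (j + 1)) 0 := by
            have hh : sol.length - j = (sol.length - (j + 1)) + 1 := by omega
            rw [hh, List.replicate_succ]
          rw [canon_len conj sol j sol.length rfl hjn hc,
              pvSuffix_cons conj sol.length j hlt hc, hsetz, hrep]
          rw [if_neg (by simp only [canReachL, Bool.or_eq_true]; exact not_or.mpr ⟨hb2, hb1⟩)]
    · -- j = len(sol): the base case, esSolucion decides
      have hje : j = sol.length := by omega
      have hnlt : ¬ ((j : Int) < (sol.length : Int)) := by exact_mod_cast hlt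
      rw [sumaVAgo]
      unfold esSolucion esFactible
      rw [if_neg hnlt, pvDotRange_eq, canon_len conj sol j sol.length rfl hjn hc]
      have hsuf : pvSuffix conj sol.length j = [] := by
        unfold pvSuffix
        rw [hje]
        simp
      have htake : sol.take j = sol := by
        rw [hje]
        exact List.take_length
      have hlenj : sol.length - j = 0 := by omega
      rw [hsuf]
      by_cases hz : pvDot conj sol sol.length = 0
      · have hz' : pvDot conj sol j = 0 := by rw [hje]; exact hz
        rw [if_pos (by simp [hz]), if_pos (by simp [canReachL, hz'])]
        simp [greedyL, htake]
      · have hz' : ¬ pvDot conj sol j = 0 := by rw [hje]; exact hz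
        rw [if_neg (by simp [hz]), if_neg (by simp only [decide_eq_true_eq]; exact hnlt),
            if_neg (by simp [canReachL, neg_eq_zero, hz'])]
        simp [htake, hlenj]

-- ===== B-side lemmas =====
lemma step_mem_aux (acc : List Int) : ∀ (init : PySem.Set Int) (c t : Int),
    t ∈ acc.foldl (fun nx s => PySem.Set.add (PySem.Set.add nx (s + c)) (s - c)) init ↔
      t ∈ init ∨ ∃ s ∈ acc, t = s + c ∨ t = s - c := by
  induction acc with
  | nil => simp
  | cons a as ih =>
    intro init c t
    rw [List.foldl_cons, ih]
    simp [PySem.Set.mem_add, or_assoc]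

lemma step_mem (acc : PySem.Set Int) (c t : Int) :
    t ∈ acc.foldl (fun nx s => PySem.Set.add (PySem.Set.add nx (s + c)) (s - c)) PySem.Set.empty ↔
      ∃ s ∈ acc, t = s + c ∨ t = s - c := by
  rw [step_mem_aux]
  simp [PySem.Set.empty]

lemma build_all (r : List Int) : ∀ (acc : PySem.Set Int) (L : List Int),
    (∀ t, t ∈ acc ↔ canReachL L t = true) → ∀ (ss : List (PySem.Set Int)),
    ∃ tail : List (PySem.Set Int),
      (r.foldl (fun (p : PySem.Set Int × List (PySem.Set Int)) c =>
        let nxt := p.1.foldl (fun nx s => PySem.Set.add (PySem.Set.add nx (s + c)) (s - c)) PySem.Set.empty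
        (nxt, p.2 ++ [nxt])) (acc, ss)).2 = ss ++ tail ∧
      tail.length = r.length ∧
      ∀ i, i < r.length → ∀ t,
        (t ∈ tail.getD i PySem.Set.empty ↔ canReachL ((r.take (i + 1)).reverse ++ L) t = true) := by
  induction r with
  | nil =>
    intro acc L _ ss
    exact ⟨[], by simp, by simp, by intro i hi t; simp at hi⟩
  | cons c r' ih =>
    intro acc L hacc ss
    rw [List.foldl_cons]
    have hnxt : ∀ t, t ∈ acc.foldl (fun nx s => PySem.Set.add (PySem.Set.add nx (s + c)) (s - c)) PySem.Set.empty ↔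
        canReachL (c :: L) t = true := by
      intro t
      rw [step_mem]
      simp only [canReachL, Bool.or_eq_true]
      constructor
      · rintro ⟨s, hs, h | h⟩
        · left
          have hs' : canReachL L s = true := (hacc s).mp hs
          rw [h, show s + c - c = s by ring]
          exact hs'
        · right
          have hs' : canReachL L s = true := (hacc s).mp hs
          rw [h, show s - c + c = s by ring]
          exact hs'
      · rintro (h | h)
        · exact ⟨t - c, (hacc _).mpr h, Or.inl (by ring)⟩
        · exact ⟨t + c, (hacc _).mpr h, Or.inr (by ring)⟩
    obtain ⟨tail', h1, h2, h3⟩ :=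
      ih (acc.foldl (fun nx s => PySem.Set.add (PySem.Set.add nx (s + c)) (s - c)) PySem.Set.empty)
        (c :: L) hnxt
        (ss ++ [acc.foldl (fun nx s => PySem.Set.add (PySem.Set.add nx (s + c)) (s - c)) PySem.Set.empty])
    refine ⟨(acc.foldl (fun nx s => PySem.Set.add (PySem.Set.add nx (s + c)) (s - c)) PySem.Set.empty) :: tail',
      ?_, by simp [h2], ?_⟩
    · dsimp only at h1 ⊢
      rw [h1]
      simp
    intro i hi t
    cases i with
    | zero =>
      simpa using hnxt t
    | succ i' =>
      rw [List.getD_cons_succ]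
      have := h3 i' (by simpa using Nat.lt_of_succ_lt_succ hi) t
      rw [this]
      simp [List.append_assoc]

lemma greedy_fold (conj : List Int) (n j0 : Nat) (sets : List (PySem.Set Int)) (hc : n ≤ conj.length)
    (hsets : ∀ m, m ≤ n - j0 → ∀ t, (t ∈ sets.getD m PySem.Set.empty ↔ canReachL (pvSuffix conj n (j0 + m)) t = true)) :
    ∀ (d j : Nat) (t : Int) (sol : List Int), n - j = d → j0 ≤ j → j ≤ n → sol.length = n →
    ((PySem.List.pyRange (j : Int) (n : Int)).foldl
      (fun (q : Int × List Int) jj =>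
        if (sets.getD (jj - (j0 : Int) + 1).toNat PySem.Set.empty).contains (q.1 + PySem.List.pyGetD conj jj 0) then
          (q.1 + PySem.List.pyGetD conj jj 0, q.2.set jj.toNat (-1))
        else
          (q.1 - PySem.List.pyGetD conj jj 0, q.2.set jj.toNat 1)) (t, sol)).2 = sol.take j ++ greedyL (pvSuffix conj n j) t := by
  intro d
  induction d with
  | zero =>
    intro j t sol hd hj0 hjn hlen
    have hje : j = n := by omega
    subst hje
    rw [PySem.List.pyRange_one_eq_nil (le_refl _)]
    have : pvSuffix conj j j = [] := by unfold pvSuffix; simp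
    rw [this]
    simp [greedyL, List.take_of_length_le (le_of_eq hlen)]
  | succ d ihd =>
    intro j t sol hd hj0 hjn hlen
    have hjlt : j < n := by omega
    rw [PySem.List.pyRange_one_cons (by exact_mod_cast hjlt), List.foldl_cons]
    have hcgd : PySem.List.pyGetD conj (j : Int) 0 = conj.getD j 0 := PySem.List.pyGetD_natCast conj j 0
    have hidx : ((j : Int) - (j0 : Int) + 1).toNat = j - j0 + 1 := by omega
    have hm : j0 + (j - j0 + 1) = j + 1 := by omega
    have hcond : (sets.getD (j - j0 + 1) PySem.Set.empty).contains (t + conj.getD j 0) =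
        canReachL (pvSuffix conj n (j + 1)) (t + conj.getD j 0) := by
      rw [Bool.eq_iff_iff, PySem.Set.contains_iff]
      have := hsets (j - j0 + 1) (by omega) (t + conj.getD j 0)
      rwa [hm] at this
    have htn : ((j : Int)).toNat = j := Int.toNat_natCast j
    have hcast : (j : Int) + 1 = ((j + 1 : Nat) : Int) := by push_cast; ring
    simp only [hcgd, hidx, hcond, htn, hcast]
    by_cases hb : canReachL (pvSuffix conj n (j + 1)) (t + conj.getD j 0) = true
    · rw [if_pos hb]
      have := ihd (j + 1) (t + conj.getD j 0) (sol.set j (-1)) (by omega) (by omega) (by omega) (by simpa using hlen)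
      rw [this, take_set_succ sol j (-1) (by omega),
          pvSuffix_cons conj n j hjlt hc]
      have hg : greedyL (conj.getD j 0 :: pvSuffix conj n (j + 1)) t =
          -1 :: greedyL (pvSuffix conj n (j + 1)) (t + conj.getD j 0) := by
        simp only [greedyL]
        rw [if_pos hb]
      rw [hg]
      simp
    · rw [if_neg hb]
      have := ihd (j + 1) (t - conj.getD j 0) (sol.set j 1) (by omega) (by omega) (by omega) (by simpa using hlen)
      rw [this, take_set_succ sol j 1 (by omega),
          pvSuffix_cons conj n j hjlt hc]
      have hg : greedyL (conj.getD j 0 :: pvSuffix conj n (j + 1)) t =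
          1 :: greedyL (pvSuffix conj n (j + 1)) (t - conj.getD j 0) := by
        simp only [greedyL]
        rw [if_neg hb]
      rw [hg]
      simp

lemma zero_fold (n : Nat) : ∀ (d j : Nat) (sol : List Int), n - j = d → j ≤ n → sol.length = n →
    (PySem.List.pyRange (j : Int) (n : Int)).foldl (fun s jj => s.set jj.toNat 0) sol =
      sol.take j ++ List.replicate (n - j) 0 := by
  intro d
  induction d with
  | zero =>
    intro j sol hd hjn hlen
    have hje : j = n := by omega
    subst hje
    rw [PySem.List.pyRange_one_eq_nil (le_refl _)]
    simp [List.take_of_length_le (le_of_eq hlen)]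
  | succ d ihd =>
    intro j sol hd hjn hlen
    have hjlt : j < n := by omega
    rw [PySem.List.pyRange_one_cons (by exact_mod_cast hjlt), List.foldl_cons]
    have htn : ((j : Int)).toNat = j := Int.toNat_natCast j
    have hcast : (j : Int) + 1 = ((j + 1 : Nat) : Int) := by push_cast; ring
    rw [htn, hcast, ihd (j + 1) (sol.set j 0) (by omega) (by omega) (by simpa using hlen),
        take_set_succ sol j 0 (by omega)]
    have hrep : List.replicate (n - j) (0 : Int) = 0 :: List.replicate (n - (j + 1)) 0 := by
      have hh : n - j = (n - (j + 1)) + 1 := by omega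
      rw [hh, List.replicate_succ]
    rw [hrep]
    simp

lemma B_char (conj : List Int) (j : Nat) (sol : List Int)
    (hj : j < sol.length) (hc : sol.length ≤ conj.length) :
    sumaVA_alt conj (j : Int) sol = canon conj sol j := by
  have hnotle : ¬ ((sol.length : Int) ≤ (j : Int)) := by exact_mod_cast Nat.not_le.mpr hj
  have htn : ((j : Int)).toNat = j := Int.toNat_natCast j
  have hslice : PySem.List.slice conj (some (j : Int)) (some (sol.length : Int)) =
      pvSuffix conj sol.length j := by
    rw [PySem.List.slice_natCast]
    rfl
  have h0 : ∀ t, t ∈ PySem.Set.ofList [(0 : Int)] ↔ canReachL [] t = true := by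
    intro t
    simp [PySem.Set.mem_ofList, canReachL]
  obtain ⟨tail, h1, h2, h3⟩ := build_all ((pvSuffix conj sol.length j).reverse)
    (PySem.Set.ofList [0]) [] h0 [PySem.Set.ofList [0]]
  have hsets_eq : ([PySem.Set.ofList [(0 : Int)]] ++ tail).reverse =
      tail.reverse ++ [PySem.Set.ofList [0]] := by simp
  have hLlen : (pvSuffix conj sol.length j).length = sol.length - j :=
    pvSuffix_length conj sol.length j (le_of_lt hj) hc
  have hrevlen : (pvSuffix conj sol.length j).reverse.length = sol.length - j := by simp [hLlen]
  have h2' : tail.length = sol.length - j := by rw [h2, hrevlen]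
  have hmem : ∀ m, m ≤ sol.length - j → ∀ t,
      (t ∈ (tail.reverse ++ [PySem.Set.ofList [0]]).getD m PySem.Set.empty ↔
        canReachL (pvSuffix conj sol.length (j + m)) t = true) := by
    intro m hm t
    rcases Nat.lt_or_ge m (sol.length - j) with hlt2 | hge2
    · have hidx : (tail.reverse ++ [PySem.Set.ofList [(0 : Int)]]).getD m PySem.Set.empty =
          tail.getD (tail.length - 1 - m) PySem.Set.empty := by
        rw [List.getD_eq_getElem?_getD,
            List.getElem?_append_left (by simp [h2']; omega),
            List.getElem?_reverse (by simp [h2']; omega), ← List.getD_eq_getElem?_getD]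
      rw [hidx]
      have h3' := h3 (tail.length - 1 - m) (by rw [hrevlen]; omega) t
      rw [h3']
      have hrev : (((pvSuffix conj sol.length j).reverse.take (tail.length - 1 - m + 1)).reverse) =
          (pvSuffix conj sol.length j).drop m := by
        rw [List.take_reverse, List.reverse_reverse]
        congr 1
        omega
      rw [List.append_nil, hrev, pvSuffix_drop]
    · have hme : m = sol.length - j := by omega
      subst hme
      have hsn : pvSuffix conj sol.length (j + (sol.length - j)) = [] := by
        unfold pvSuffix
        rw [Nat.add_sub_cancel' (le_of_lt hj)]
        simp
      rw [hsn, List.getD_eq_getElem?_getD,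
          List.getElem?_append_right (by simp [h2'])]
      simp [h2', PySem.Set.mem_ofList, canReachL]
  have hcont : ((tail.reverse ++ [PySem.Set.ofList [(0 : Int)]]).getD 0 PySem.Set.empty).contains
      (-(pvDot conj sol j)) = canReachL (pvSuffix conj sol.length j) (-(pvDot conj sol j)) := by
    rw [Bool.eq_iff_iff, PySem.Set.contains_iff]
    simpa using hmem 0 (by omega) (-(pvDot conj sol j))
  unfold sumaVA_alt
  rw [if_neg hnotle]
  dsimp only
  rw [htn, pvDotRange_eq, hslice, h1, hsets_eq,
      canon_len conj sol j sol.length rfl (le_of_lt hj) hc]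
  by_cases hcr : canReachL (pvSuffix conj sol.length j) (-(pvDot conj sol j)) = true
  · have hcb : ((tail.reverse ++ [PySem.Set.ofList [(0 : Int)]]).getD 0 PySem.Set.empty).contains
        (-(pvDot conj sol j)) = true := by rw [hcont]; exact hcr
    rw [if_neg (by rw [hcb]; simp), if_pos hcr]
    rw [greedy_fold conj sol.length j (tail.reverse ++ [PySem.Set.ofList [0]]) hc hmem
        (sol.length - j) j (-(pvDot conj sol j)) sol rfl (le_refl j) (le_of_lt hj) rfl]
  · have hcb : ((tail.reverse ++ [PySem.Set.ofList [(0 : Int)]]).getD 0 PySem.Set.empty).contains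
        (-(pvDot conj sol j)) = false := by rw [hcont]; exact Bool.eq_false_iff.mpr hcr
    rw [if_pos (by rw [hcb]; simp), if_neg hcr]
    rw [zero_fold sol.length (sol.length - j) j sol rfl (le_of_lt hj) rfl]


-- ===== VERDICT (by name: the statement is the Claim_ definition above) =====
theorem sumaVA_spec : Claim_equal_sumaVA := by
  intro conj k sol _ hpre
  obtain ⟨hk, hlen⟩ := hpre
  unfold Spec_sumaVA
  by_cases hge : (sol.length : Int) ≤ k
  · -- k ≥ len(sol): both sides are the plain sum test on the whole of sol
    unfold sumaVA
    rw [sumaVAgo]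
    unfold esSolucion esFactible sumaVA_alt
    have hnlt : ¬ (k < (sol.length : Int)) := not_lt.mpr hge
    rw [if_neg hnlt, if_pos hge]
    by_cases hz : pvDotRange conj sol sol.length = 0
    · simp [hz]
    · simp [hz, hnlt]
  · -- k < len(sol): both sides equal the canonical DP form
    have hklt : k < (sol.length : Int) := not_le.mp hge
    have hkeq : k = ((k.toNat : Nat) : Int) := (Int.toNat_of_nonneg hk).symm
    have hjlt : k.toNat < sol.length := by omega
    rw [hkeq]
    unfold sumaVA
    rw [A_char conj ((sol.length + (-((k.toNat : Nat) : Int)).toNat) + 1) k.toNat sol (le_of_lt hjlt) hlen (by omega),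
        B_char conj k.toNat sol hjlt hlen]
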